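-- pv_equiv track=rewrite | github.com/viorato/compute_rational_links_genus | computeGenus.py | compute_euler
-- ===== SOURCE A (Python) =====
-- def compute_euler(word, mu):
--     """ Compute the euler number of the surface given by a word of A's and D's,
--         we assume rho = 1 and mu is a required parameter.
--     """
--     euler = mu+1
--     for char in word:
--         if char=='D':
--             euler-= (mu -1)
--         else:
--             euler-=1
--     return euler
-- ===== SOURCE B (Python) =====
-- def compute_euler(word, mu):
--     """ Compute the euler number of the surface given by a word of A's and D's,
--         we assume rho = 1 and mu is a required parameter.
--         Divide and conquer: the total decrement contributed by a word is the
--         sum of the decrements of its two halves, since the contribution of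
--         each character is independent of its position; single characters are
--         the base cases.
--     """
--     def drop(w):
--         if len(w) == 0:
--             return 0
--         if len(w) == 1:
--             return mu - 1 if w == 'D' else 1
--         m = len(w) // 2
--         return drop(w[:m]) + drop(w[m:])
--     return mu + 1 - drop(word)
-- ===== Notes on version B (the rewrite author's own statement) =====
-- stated objective: alternative
-- what changed: Replaces A's left-to-right accumulator loop with a divide-and-conquer recursion: the decrement of a word is the sum of the decrements of its two halves (contributions are position-independent), with single characters as base cases, then returns mu+1 minus that total.
import Mathlib
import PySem

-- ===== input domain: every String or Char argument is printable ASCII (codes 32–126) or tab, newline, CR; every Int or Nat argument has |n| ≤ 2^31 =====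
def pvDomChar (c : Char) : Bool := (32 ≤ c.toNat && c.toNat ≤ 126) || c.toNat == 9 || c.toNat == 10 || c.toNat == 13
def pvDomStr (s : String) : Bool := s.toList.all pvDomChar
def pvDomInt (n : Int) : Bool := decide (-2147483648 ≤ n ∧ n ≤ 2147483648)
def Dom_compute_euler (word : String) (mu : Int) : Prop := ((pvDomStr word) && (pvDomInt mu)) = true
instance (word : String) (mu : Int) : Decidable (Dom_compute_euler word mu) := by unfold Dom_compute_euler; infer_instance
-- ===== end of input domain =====

-- B replaces A's accumulator loop with a divide-and-conquer recursion on the two halves of the word (alternative decomposition; same O(n) cost).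


-- ===== PORT A =====
-- euler = mu+1; for char in word: euler -= (mu-1) if char=='D' else 1
def compute_euler (word : String) (mu : Int) : Int :=
  word.toList.foldl (fun euler char => if char == 'D' then euler - (mu - 1) else euler - 1) (mu + 1)

-- ===== PORT B =====
-- inner helper drop(w): 0 for empty, mu-1/1 for a single char, else drop(w[:m]) + drop(w[m:]) with m = len(w)//2
-- (m = len//2 lies in [0,len], so the Python slices w[:m] and w[m:] are exactly take m / drop m)
def ceDrop (mu : Int) (l : List Char) : Int :=
  if l.length = 0 then 0
  else if l.length = 1 then (if l == ['D'] then mu - 1 else 1)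
  else
    let m := l.length / 2
    ceDrop mu (l.take m) + ceDrop mu (l.drop m)
termination_by l.length
decreasing_by
  · simp only [List.length_take]; omega
  · simp only [List.length_drop]; omega

-- return mu + 1 - drop(word)
def compute_euler_alt (word : String) (mu : Int) : Int :=
  mu + 1 - ceDrop mu word.toList

-- ===== PRECONDITION & SPEC =====
def Spec_compute_euler (word : String) (mu : Int) (out : Int) : Prop := out = compute_euler_alt word mu
instance (word : String) (mu : Int) (out : Int) : Decidable (Spec_compute_euler word mu out) := by unfold Spec_compute_euler; infer_instance

-- ===== CLAIM (what is proved, stated in full; the proofs are below) =====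
def Claim_equal_compute_euler : Prop := ∀ (word : String) (mu : Int), Dom_compute_euler word mu → Spec_compute_euler word mu (compute_euler word mu)

-- ===== LEMMAS AND PROOFS =====

-- B's divide-and-conquer total equals the per-character total: count(D)*(mu-1) + (len - count(D)).
theorem ceDrop_closed (mu : Int) :
    ∀ (n : Nat) (l : List Char), l.length ≤ n →
      ceDrop mu l = (l.count 'D' : Int) * (mu - 1) + ((l.length : Int) - (l.count 'D' : Int)) := by
  intro n
  induction n with
  | zero =>
    intro l h
    have : l = [] := List.eq_nil_of_length_eq_zero (Nat.le_zero.mp h)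
    subst this; simp [ceDrop]
  | succ k ih =>
    intro l h
    rw [ceDrop]
    by_cases h0 : l.length = 0
    · have : l = [] := List.eq_nil_of_length_eq_zero h0
      subst this; simp
    · by_cases h1 : l.length = 1
      · obtain ⟨c, rfl⟩ : ∃ c, l = [c] := by
          cases l with
          | nil => simp at h0
          | cons x t =>
            cases t with
            | nil => exact ⟨x, rfl⟩
            | cons y u => simp at h1
        simp only [h1, if_true]
        by_cases hc : c = 'D'
        · subst hc; simp
        · have : ([c] == ['D']) = false := by simpa using hc
          simp [this, hc]
      · simp only [h0, h1, if_false]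
        have hm1 : (l.take (l.length / 2)).length ≤ k := by
          simp only [List.length_take]; omega
        have hm2 : (l.drop (l.length / 2)).length ≤ k := by
          simp only [List.length_drop]; omega
        rw [ih _ hm1, ih _ hm2]
        have hc : l.count 'D' = (l.take (l.length / 2)).count 'D' + (l.drop (l.length / 2)).count 'D' := by
          conv_lhs => rw [← List.take_append_drop (l.length / 2) l]
          rw [List.count_append]
        have hl : (l.length : Int) = ((l.take (l.length / 2)).length : Int) + ((l.drop (l.length / 2)).length : Int) := by
          simp only [List.length_take, List.length_drop]; push_cast; omega
        conv_rhs => rw [hc, hl]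
        push_cast
        ring

-- A's loop computes the same closed form.
theorem foldA (mu : Int) :
    ∀ (l : List Char) (e : Int),
      l.foldl (fun euler char => if char == 'D' then euler - (mu - 1) else euler - 1) e
        = e - (l.count 'D' : Int) * (mu - 1) - ((l.length : Int) - (l.count 'D' : Int)) := by
  intro l
  induction l with
  | nil => intro e; simp
  | cons x t ih =>
    intro e
    by_cases hx : x = 'D'
    · subst hx
      simp only [List.foldl_cons, beq_self_eq_true, if_true, ih, List.count_cons_self,
        List.length_cons]
      push_cast; ring
    · have hb : (x == 'D') = false := by simp [hx]
      simp only [List.foldl_cons, hb, ih, List.length_cons, List.count_cons_of_ne hx]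
      push_cast; ring

-- ===== VERDICT (by name: the statement is the Claim_ definition above) =====
theorem compute_euler_spec : Claim_equal_compute_euler := by
  intro word mu _
  unfold Spec_compute_euler compute_euler compute_euler_alt
  rw [foldA, ceDrop_closed mu word.toList.length word.toList (le_refl _)]
  ring
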